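-- pv_equiv track=rewrite | github.com/thirvusoft/sst | shiva_sakkthi_printers/shiva_sakkthi_printers/page/manufacturing_jobcard/manufacturing_jobcard.py | work_order_sep_color
-- ===== SOURCE A (Python) =====
-- def work_order_sep_attr3(wo, attr):
--   workorder={}
--   for i in wo:
--     if(i[attr] in workorder):
--       workorder[i[attr]].append(i)
--     else:
--       workorder[i[attr]]=[i]
--   return workorder
--
-- def work_order_sep_color(wo):
--   workorder={}
--   for i in wo:
--     worder={}
--     for j in wo[i]:
--       worder[j]=work_order_sep_attr3(wo[i][j],'colour')
--     workorder[i]=worder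
--   return workorder
-- ===== SOURCE B (Python) =====
-- def work_order_sep_color(wo):
--     result = {}
--     for i in wo:
--         section = {}
--         for j in wo[i]:
--             items = wo[i][j]
--             colours = list(dict.fromkeys(x['colour'] for x in items))
--             section[j] = {c: [x for x in items if x['colour'] == c] for c in colours}
--         result[i] = section
--     return result
-- ===== Notes on version B (the rewrite author's own statement) =====
-- stated objective: alternative
-- what changed: Replaces the hash-bucket helper (one pass appending into a dict with a membership branch) by a two-phase grouping: first collect the distinct colours in first-occurrence order with dict.fromkeys, then build each group by filtering the list per colour.
import Mathlib
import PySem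

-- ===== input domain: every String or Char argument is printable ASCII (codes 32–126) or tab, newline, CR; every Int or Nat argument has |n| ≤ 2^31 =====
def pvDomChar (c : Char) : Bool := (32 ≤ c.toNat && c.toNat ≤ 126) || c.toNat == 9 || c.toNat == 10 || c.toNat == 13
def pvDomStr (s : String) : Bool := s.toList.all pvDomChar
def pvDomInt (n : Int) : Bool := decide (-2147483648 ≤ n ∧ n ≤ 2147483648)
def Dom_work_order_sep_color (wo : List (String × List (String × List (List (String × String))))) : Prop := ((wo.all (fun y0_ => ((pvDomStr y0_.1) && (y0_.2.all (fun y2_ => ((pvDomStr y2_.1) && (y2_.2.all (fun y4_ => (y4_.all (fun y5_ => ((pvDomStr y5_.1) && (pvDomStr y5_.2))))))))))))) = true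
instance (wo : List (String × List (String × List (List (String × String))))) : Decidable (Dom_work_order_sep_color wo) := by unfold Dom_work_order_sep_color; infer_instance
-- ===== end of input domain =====

-- B replaces A's hash-bucket grouping pass by a dedup-then-filter grouping (distinct colours in
-- first-occurrence order, then one filter per colour); same result, no speed claim.


-- ===== PORT A =====
-- i['colour'] : first-match lookup in the item's association list; Python raises KeyError when
-- the key is absent — those inputs are excluded by Pre_ below, the '""' default is never reached there.
def pvColourA (i : List (String × String)) : String :=
  (PySem.Dict.mk i).getD "colour" ""

-- work_order_sep_attr3(wo, 'colour'): one pass appending each item into its colour bucket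
def work_order_sep_attr3 (wo : List (List (String × String))) : PySem.Dict String (List (List (String × String))) :=
  wo.foldl (fun workorder i =>
      if workorder.contains (pvColourA i) then
        workorder.modify (pvColourA i) [] (· ++ [i])
      else
        workorder.insert (pvColourA i) [i])
    PySem.Dict.empty

def work_order_sep_color (wo : List (String × List (String × List (List (String × String))))) : List (String × List (String × List (String × List (List (String × String))))) :=
  wo.map (fun i => (i.1, i.2.map (fun j => (j.1, (work_order_sep_attr3 j.2).items))))

-- ===== PORT B =====
def work_order_sep_color_alt (wo : List (String × List (String × List (List (String × String))))) : List (String × List (String × List (String × List (List (String × String))))) :=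
  wo.map (fun i => (i.1, i.2.map (fun j =>
    (j.1, (PySem.List.dedup (j.2.map (fun x => (PySem.Dict.mk x).getD "colour" ""))).map
            (fun c => (c, j.2.filter (fun x => (PySem.Dict.mk x).getD "colour" "" == c)))))))

-- ===== PRECONDITION & SPEC =====
-- Pre_ excludes exactly the inputs on which Python A raises KeyError: some innermost item
-- dict lacking the key 'colour' (Python B raises there too).
def Pre_work_order_sep_color (wo : List (String × List (String × List (List (String × String))))) : Prop :=
  (wo.all (fun i => i.2.all (fun j => j.2.all (fun x => x.any (fun kv => kv.1 == "colour"))))) = true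
instance (wo : List (String × List (String × List (List (String × String))))) : Decidable (Pre_work_order_sep_color wo) := by unfold Pre_work_order_sep_color; infer_instance

def pvWitness_work_order_sep_color : (List (String × List (String × List (List (String × String))))) :=
  [("wo1", [("op1", [[("colour", "red"), ("qty", "2")], [("colour", "blue")], [("colour", "red")]]), ("op2", [])])]

def Spec_work_order_sep_color (wo : List (String × List (String × List (List (String × String))))) (out : List (String × List (String × List (String × List (List (String × String)))))) : Prop := out = work_order_sep_color_alt wo
instance (wo : List (String × List (String × List (List (String × String))))) (out : List (String × List (String × List (String × List (List (String × String)))))) : Decidable (Spec_work_order_sep_color wo out) := by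
  unfold Spec_work_order_sep_color
  haveI h1 : DecidableEq (List (List (String × String))) := inferInstance
  haveI h2 : DecidableEq (List (String × List (List (String × String)))) := inferInstance
  haveI h3 : DecidableEq (List (String × List (String × List (List (String × String))))) := inferInstance
  haveI h4 : DecidableEq (List (String × List (String × List (String × List (List (String × String)))))) := inferInstance
  infer_instance

-- ===== CLAIM (what is proved, stated in full; the proofs are below) =====
def Claim_equal_work_order_sep_color : Prop := ∀ (wo : List (String × List (String × List (List (String × String))))), Dom_work_order_sep_color wo → Pre_work_order_sep_color wo → Spec_work_order_sep_color wo (work_order_sep_color wo)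

-- ===== LEMMAS AND PROOFS =====

-- A's branchy bucket step is a single Dict.modify
lemma attr3_step (d : PySem.Dict String (List (List (String × String)))) (i : List (String × String)) :
    (if d.contains (pvColourA i) then d.modify (pvColourA i) [] (· ++ [i])
     else d.insert (pvColourA i) [i]) = d.modify (pvColourA i) [] (· ++ [i]) := by
  split_ifs with h
  · rfl
  · simp [PySem.Dict.modify,
      PySem.Dict.getD_of_not_contains d ([] : List (List (String × String))) (by simpa using h)]

lemma attr3_eq_foldl_modify (wo : List (List (String × String))) :
    work_order_sep_attr3 wo
      = wo.foldl (fun d i => d.modify (pvColourA i) [] (· ++ [i])) PySem.Dict.empty := by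
  unfold work_order_sep_attr3
  congr 1
  funext d i
  exact attr3_step d i

lemma getD_bucket (l : List (List (String × String))) (d : PySem.Dict String (List (List (String × String)))) (c : String) :
    (l.foldl (fun d i => d.modify (pvColourA i) [] (· ++ [i])) d).getD c []
      = d.getD c [] ++ l.filter (fun x => pvColourA x == c) := by
  induction l generalizing d with
  | nil => simp
  | cons i t ih =>
    rw [List.foldl_cons, ih, PySem.Dict.getD_modify]
    by_cases h : c = pvColourA i
    · simp [h]
    · simp [h, beq_iff_eq, Ne.symm h]

lemma keys_bucket (l : List (List (String × String))) :
    (l.foldl (fun d i => d.modify (pvColourA i) [] (· ++ [i])) PySem.Dict.empty).keys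
      = PySem.List.dedup (l.map pvColourA) := by
  rw [PySem.Dict.keys_foldl_modify_key l pvColourA ([] : List (List (String × String)))
      (fun _ i v => v ++ [i]) PySem.Dict.empty]
  simp [PySem.Set.update, PySem.Dict.keys_empty, PySem.List.dedup_eq_ofList,
    PySem.Set.ofList_eq_foldl]

lemma attr3_items (l : List (List (String × String))) :
    (work_order_sep_attr3 l).items
      = (PySem.List.dedup (l.map pvColourA)).map
          (fun c => (c, l.filter (fun x => pvColourA x == c))) := by
  rw [attr3_eq_foldl_modify]
  have hnd : (l.foldl (fun d i => d.modify (pvColourA i) [] (· ++ [i])) PySem.Dict.empty).keys.Nodup :=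
    PySem.Dict.nodup_keys_foldl_modify_key l pvColourA ([] : List (List (String × String)))
      (fun _ i v => v ++ [i]) PySem.Dict.empty (by simp)
  rw [PySem.Dict.items_eq_map_keys _ hnd ([] : List (List (String × String))), keys_bucket]
  exact List.map_congr_left (fun c hc => by rw [getD_bucket]; simp)

-- ===== VERDICT (by name: the statement is the Claim_ definition above) =====
theorem work_order_sep_color_spec : Claim_equal_work_order_sep_color := by
  intro wo _ _
  unfold Spec_work_order_sep_color work_order_sep_color work_order_sep_color_alt
  refine List.map_congr_left (fun i _ => ?_)
  refine congrArg (Prod.mk i.1) (List.map_congr_left (fun j _ => ?_))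
  exact congrArg (Prod.mk j.1) (attr3_items j.2)
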